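-- pv_equiv track=rewrite | github.com/ymoisan/xcube | xcube/server/webservers/tornado.py | path_to_pattern
-- ===== SOURCE A (Python) =====
-- def path_to_pattern(path: str):
--     """
--     Convert a string *pattern* where any occurrences of ``{NAME}``
--     are replaced by an equivalent regex expression which will
--     assign matching character groups to NAME. Characters match until
--     one of the RFC 2396 reserved characters is found or the end of
--     the *pattern* is reached.
--
--     :param path: URL path
--     :return: equivalent regex pattern
--     :raise ValueError: if *pattern* is invalid
--     """
--     var_pattern = r'(?P<%s>[^\;\/\?\:\@\&\=\+\$\,]+)'
--     rest_var_pattern = r'\/?(?P<%s>.*)'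
--     num_rest_vars = 0
--     rest_var_seen = False
--     reg_expr = ''
--     pos = 0
--     while True:
--         pos1 = path.find('{', pos)
--         if pos1 >= 0:
--             pos2 = path.find('}', pos1 + 1)
--             if pos2 <= pos1:
--                 raise ValueError('missing closing "}" in "%s"' % path)
--             arg = path[pos1 + 1:pos2]
--             if arg.startswith('*'):
--                 rest_var_seen = True
--                 name = arg[1:]
--                 pattern = rest_var_pattern
--                 if pos1 > 0 and path[pos1 - 1] == '/':
--                     # Consume a trailing "/" because it is
--                     # covered in pattern
--                     pos1 -= 1
--                 num_rest_vars += 1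
--             else:
--                 rest_var_seen = False
--                 name = arg
--                 pattern = var_pattern
--             if not name.isidentifier():
--                 raise ValueError(
--                     '"{name}" in path must be a valid identifier,'
--                     ' but got "%s"' % arg
--                 )
--             reg_expr += path[pos:pos1] + (pattern % name)
--             pos = pos2 + 1
--         else:
--             pos2 = path.find('}', pos)
--             if pos2 >= pos:
--                 raise ValueError('missing opening "{" in "%s"' % path)
--             rest_of_path = path[pos:]
--             if rest_var_seen and rest_of_path:
--                 raise ValueError('wildcard variable must be last in path,'
--                                  f' but path was "{path}"')
--             reg_expr += rest_of_path
--             rest_var_seen = False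
--             break
--     if num_rest_vars > 1:
--         raise ValueError(
--             'only a single wildcard variable is allowed,'
--             f' but found {num_rest_vars} in path "{path}"'
--         )
--     return reg_expr
-- ===== SOURCE B (Python) =====
-- def path_to_pattern(path: str):
--     """
--     Convert a string *pattern* where any occurrences of ``{NAME}``
--     are replaced by an equivalent regex expression which will
--     assign matching character groups to NAME.
--
--     :param path: URL path
--     :return: equivalent regex pattern
--     :raise ValueError: if *pattern* is invalid
--     """
--     var_pattern = r'(?P<%s>[^\;\/\?\:\@\&\=\+\$\,]+)'
--     rest_var_pattern = r'\/?(?P<%s>.*)'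
--     parts = path.split('{')
--     out = []
--     lit = parts[0]
--     num_rest_vars = 0
--     last_was_rest = False
--     for seg in parts[1:]:
--         arg, brace, tail = seg.partition('}')
--         if not brace:
--             raise ValueError('missing closing "}" in "%s"' % path)
--         if arg.startswith('*'):
--             name = arg[1:]
--             if lit.endswith('/'):
--                 # the trailing "/" is covered by the pattern itself
--                 lit = lit[:-1]
--             pattern = rest_var_pattern
--             num_rest_vars += 1
--             last_was_rest = True
--         else:
--             name = arg
--             pattern = var_pattern
--             last_was_rest = False
--         if not name.isidentifier():
--             raise ValueError(
--                 '"{name}" in path must be a valid identifier,'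
--                 ' but got "%s"' % arg
--             )
--         out.append(lit + pattern % name)
--         lit = tail
--     if '}' in lit:
--         raise ValueError('missing opening "{" in "%s"' % path)
--     if last_was_rest and lit:
--         raise ValueError('wildcard variable must be last in path,'
--                          f' but path was "{path}"')
--     if num_rest_vars > 1:
--         raise ValueError(
--             'only a single wildcard variable is allowed,'
--             f' but found {num_rest_vars} in path "{path}"'
--         )
--     return ''.join(out) + lit
-- ===== Notes on version B (the rewrite author's own statement) =====
-- stated objective: alternative
-- what changed: B splits the path once at '{' and folds over the resulting brace segments (partitioning each at its first '}'), instead of A's while-True pointer loop driven by repeated str.find index arithmetic.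
import Mathlib
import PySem

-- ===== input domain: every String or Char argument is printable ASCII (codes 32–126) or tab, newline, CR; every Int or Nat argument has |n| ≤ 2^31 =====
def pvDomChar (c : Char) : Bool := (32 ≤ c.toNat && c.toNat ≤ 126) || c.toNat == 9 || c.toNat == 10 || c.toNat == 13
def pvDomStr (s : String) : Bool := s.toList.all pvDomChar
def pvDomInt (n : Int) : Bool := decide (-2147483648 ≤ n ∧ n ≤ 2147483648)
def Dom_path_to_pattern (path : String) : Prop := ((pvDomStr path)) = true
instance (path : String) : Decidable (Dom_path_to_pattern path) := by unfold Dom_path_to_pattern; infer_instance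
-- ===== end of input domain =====

-- B re-implements A by splitting the path once at '{' and folding over the brace
-- segments, instead of A's while-loop with str.find index arithmetic; same return
-- value wherever A returns (objective: alternative decomposition, not speed).

-- ===== PORT A =====

-- Python str.isidentifier, exact on the ASCII domain: [A-Za-z_][A-Za-z0-9_]*
def pyIsIdentifier (s : List Char) : Bool :=
  match s with
  | [] => false
  | c :: rest => (c.isAlpha || c == '_') && rest.all (fun d => d.isAlphanum || d == '_')

-- index of the first occurrence of c in l (none if absent)
def firstIdx (c : Char) : List Char → Option Nat
  | [] => none
  | x :: xs => if x = c then some 0 else (firstIdx c xs).map (· + 1)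

-- Python path.find(c, pos) for 0 ≤ pos; none plays the role of -1 (exact)
def pvFindA (cs : List Char) (c : Char) (pos : Nat) : Option Nat :=
  (firstIdx c (cs.drop pos)).map (pos + ·)

theorem firstIdx_lt_length {c : Char} {l : List Char} {i : Nat}
    (h : firstIdx c l = some i) : i < l.length := by
  induction l generalizing i with
  | nil => simp [firstIdx] at h
  | cons x xs ih =>
    by_cases hx : x = c
    · simp [firstIdx, hx] at h
      simp only [List.length_cons]
      omega
    · simp [firstIdx, hx] at h
      obtain ⟨j, hj, rfl⟩ := h
      have := ih hj
      simp only [List.length_cons]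
      omega

theorem pvFindA_bounds {cs : List Char} {c : Char} {pos i : Nat}
    (h : pvFindA cs c pos = some i) : pos ≤ i ∧ i < cs.length := by
  simp only [pvFindA, Option.map_eq_some_iff] at h
  obtain ⟨j, hj, rfl⟩ := h
  have := firstIdx_lt_length hj
  simp only [List.length_drop] at this
  omega

-- var_pattern % name
def varPatA (name : List Char) : List Char :=
  "(?P<".toList ++ name ++ ">[^\\;\\/\\?\\:\\@\\&\\=\\+\\$\\,]+)".toList
-- rest_var_pattern % name
def restPatA (name : List Char) : List Char :=
  "\\/?(?P<".toList ++ name ++ ">.*)".toList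

-- A's 'while True' loop; state = (pos, reg_expr, rest_var_seen, num_rest_vars);
-- none = ValueError raised; slices path[a:b] with 0 ≤ a ≤ b ≤ len are drop/take (exact here)
def loopA (cs : List Char) (pos : Nat) (acc : List Char) (seen : Bool) (nrv : Nat) :
    Option (List Char × Nat) :=
  match h1 : pvFindA cs '{' pos with
  | some pos1 =>
    match h2 : pvFindA cs '}' (pos1 + 1) with
    | none => none  -- 'missing closing "}"' (find = -1, i.e. pos2 ≤ pos1)
    | some pos2 =>
      let arg := (cs.drop (pos1 + 1)).take (pos2 - (pos1 + 1))
      if arg.head? = some '*' then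
        let name := arg.tail
        let pos1' := if 0 < pos1 ∧ cs.getD (pos1 - 1) ' ' = '/' then pos1 - 1 else pos1
        if pyIsIdentifier name then
          loopA cs (pos2 + 1) (acc ++ (cs.drop pos).take (pos1' - pos) ++ restPatA name)
            true (nrv + 1)
        else none  -- identifier ValueError
      else
        if pyIsIdentifier arg then
          loopA cs (pos2 + 1) (acc ++ (cs.drop pos).take (pos1 - pos) ++ varPatA arg)
            false nrv
        else none  -- identifier ValueError
  | none =>
    match pvFindA cs '}' pos with
    | some _ => none  -- 'missing opening "{"'
    | none =>
      let rest := cs.drop pos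
      if seen ∧ rest ≠ [] then none  -- 'wildcard variable must be last'
      else some (acc ++ rest, nrv)
termination_by cs.length + 1 - pos
decreasing_by
  · have hb1 := pvFindA_bounds h1
    have hb2 := pvFindA_bounds h2
    omega
  · have hb1 := pvFindA_bounds h1
    have hb2 := pvFindA_bounds h2
    omega

def path_to_pattern (path : String) : String :=
  match loopA path.toList 0 [] false 0 with
  | none => ""  -- ValueError
  | some (r, nrv) => if 1 < nrv then "" else String.ofList r  -- final 'num_rest_vars > 1' check

-- ===== PORT B =====

-- the character test 'x is not the separator c', named so proofs can cite it
def pvNe (c : Char) : Char → Bool := fun x => x ≠ c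

-- Python path.split('{')
def splitLB : List Char → List (List Char)
  | [] => [[]]
  | x :: xs =>
    if x = '{' then [] :: splitLB xs
    else
      match splitLB xs with
      | [] => [[x]]
      | p :: ps => (x :: p) :: ps

def varPatB (name : List Char) : List Char :=
  "(?P<".toList ++ name ++ ">[^\\;\\/\\?\\:\\@\\&\\=\\+\\$\\,]+)".toList
def restPatB (name : List Char) : List Char :=
  "\\/?(?P<".toList ++ name ++ ">.*)".toList

-- B's 'for seg in parts[1:]' loop, state (lit, out, num_rest_vars, last_was_rest);
-- 'arg, brace, tail = seg.partition('}')' is takeWhile / dropWhile.tail; none = ValueError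
def loopB (segs : List (List Char)) (lit : List Char) (out : List Char)
    (wc : Nat) (lw : Bool) : Option (List Char) :=
  match segs with
  | [] =>
    if '}' ∈ lit then none  -- 'missing opening "{"'
    else if lw ∧ lit ≠ [] then none  -- 'wildcard variable must be last'
    else if 1 < wc then none  -- 'only a single wildcard variable'
    else some (out ++ lit)  -- ''.join(out) + lit
  | seg :: rest =>
    if '}' ∈ seg then
      let arg := seg.takeWhile (pvNe '}')
      let tl := (seg.dropWhile (pvNe '}')).tail
      if arg.head? = some '*' then
        let lit' := if lit.getLast? = some '/' then lit.dropLast else lit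
        if pyIsIdentifier arg.tail then
          loopB rest tl (out ++ lit' ++ restPatB arg.tail) (wc + 1) true
        else none  -- identifier ValueError
      else
        if pyIsIdentifier arg then
          loopB rest tl (out ++ lit ++ varPatB arg) wc false
        else none  -- identifier ValueError
    else none  -- 'missing closing "}"'

def path_to_pattern_alt (path : String) : String :=
  match splitLB path.toList with
  | [] => ""  -- unreachable: split never yields []
  | lit :: segs =>
    match loopB segs lit [] 0 false with
    | none => ""  -- ValueError
    | some r => String.ofList r

-- ===== PRECONDITION & SPEC =====

-- shape of one '{'-segment: its group (text before the first '}') and its trailing literal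
def pvGroup (seg : List Char) : List Char := seg.takeWhile (pvNe '}')
def pvTail (seg : List Char) : List Char := (seg.dropWhile (pvNe '}')).tail
def pvIsWild (seg : List Char) : Bool := (pvGroup seg).head? == some '*'
-- a segment is well formed: it contains a '}' and its group is an identifier (after '*')
def pvGroupOk (seg : List Char) : Bool :=
  ('}' ∈ seg : Bool)
    && (if pvIsWild seg then pyIsIdentifier (pvGroup seg).tail else pyIsIdentifier (pvGroup seg))

-- Pre_ = exactly the paths on which Python A returns (everywhere else A raises ValueError):
-- every '{'-segment is well formed, the trailing literal has no stray '}', a wildcard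
-- group in the last segment leaves no trailing literal, and at most one group is a wildcard
def Pre_path_to_pattern (path : String) : Prop :=
  (match splitLB path.toList with
   | [] => false
   | lit :: segs =>
     segs.all pvGroupOk
       && !('}' ∈ segs.getLast?.elim lit pvTail : Bool)
       && (match segs.getLast? with
           | some sg => !pvIsWild sg || (pvTail sg).isEmpty
           | none => true)
       && decide (segs.countP pvIsWild ≤ 1)) = true

instance (path : String) : Decidable (Pre_path_to_pattern path) := by
  unfold Pre_path_to_pattern; infer_instance

def pvWitness_path_to_pattern : String := "/x/{a}/{*b}"

def Spec_path_to_pattern (path : String) (out : String) : Prop := out = path_to_pattern_alt path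
instance (path : String) (out : String) : Decidable (Spec_path_to_pattern path out) := by
  unfold Spec_path_to_pattern; infer_instance

-- ===== CLAIM (what is proved, stated in full; the proofs are below) =====
def Claim_equal_path_to_pattern : Prop := ∀ (path : String), Dom_path_to_pattern path → Pre_path_to_pattern path → Spec_path_to_pattern path (path_to_pattern path)

-- ===== LEMMAS AND PROOFS =====

def joinRest (segs : List (List Char)) : List Char := segs.flatMap (fun s => '{' :: s)

theorem joinRest_nil : joinRest [] = [] := rfl

theorem joinRest_cons (s : List Char) (r : List (List Char)) :
    joinRest (s :: r) = '{' :: (s ++ joinRest r) := by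
  simp [joinRest]

theorem firstIdx_none {c : Char} {l : List Char} (h : c ∉ l) : firstIdx c l = none := by
  induction l with
  | nil => rfl
  | cons x xs ih =>
    simp only [List.mem_cons, not_or] at h
    rw [firstIdx, if_neg (by rintro rfl; exact h.1 rfl), ih h.2]
    rfl

theorem firstIdx_mem {c : Char} {l : List Char} (h : c ∈ l) :
    firstIdx c l = some ((l.takeWhile (pvNe c)).length) := by
  induction l with
  | nil => cases h
  | cons x xs ih =>
    by_cases hx : x = c
    · subst hx
      rw [List.takeWhile_cons, if_neg (by simp [pvNe])]
      simp [firstIdx]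
    · have hc : c ∈ xs := by
        rcases List.mem_cons.mp h with h' | h'
        · exact absurd h'.symm hx
        · exact h'
      rw [List.takeWhile_cons, if_pos (by simp [pvNe, hx]), firstIdx, if_neg hx, ih hc]
      rfl

theorem tw_lt {c : Char} {l : List Char} (h : c ∈ l) :
    (l.takeWhile (pvNe c)).length < l.length := by
  induction l with
  | nil => cases h
  | cons x xs ih =>
    by_cases hx : x = c
    · subst hx
      rw [List.takeWhile_cons, if_neg (by simp [pvNe])]
      simp
    · have hc : c ∈ xs := by
        rcases List.mem_cons.mp h with h' | h'
        · exact absurd h'.symm hx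
        · exact h'
      rw [List.takeWhile_cons, if_pos (by simp [pvNe, hx])]
      have := ih hc
      simp only [List.length_cons]
      omega

theorem take_tw (p : Char → Bool) (l : List Char) :
    l.take (l.takeWhile p).length = l.takeWhile p := by
  induction l with
  | nil => rfl
  | cons x xs ih =>
    by_cases hp : p x = true
    · rw [List.takeWhile_cons, if_pos hp]
      simp [ih]
    · rw [List.takeWhile_cons, if_neg hp]
      rfl

theorem drop_tw (p : Char → Bool) (l : List Char) :
    l.drop (l.takeWhile p).length = l.dropWhile p := by
  induction l with
  | nil => rfl
  | cons x xs ih =>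
    by_cases hp : p x = true
    · rw [List.takeWhile_cons, if_pos hp, List.dropWhile_cons, if_pos hp]
      simpa using ih
    · rw [List.takeWhile_cons, if_neg hp, List.dropWhile_cons, if_neg hp]
      rfl

theorem dw_cons {c : Char} {l : List Char} (h : c ∈ l) :
    l.dropWhile (pvNe c) = c :: (l.dropWhile (pvNe c)).tail := by
  induction l with
  | nil => cases h
  | cons x xs ih =>
    by_cases hx : x = c
    · subst hx
      rw [List.dropWhile_cons, if_neg (by simp [pvNe])]
      rfl
    · have hc : c ∈ xs := by
        rcases List.mem_cons.mp h with h' | h'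
        · exact absurd h'.symm hx
        · exact h'
      rw [List.dropWhile_cons, if_pos (by simp [pvNe, hx])]
      exact ih hc

theorem tw_append_none {c : Char} {l t : List Char} (h : c ∉ l) :
    (l ++ t).takeWhile (pvNe c) = l ++ t.takeWhile (pvNe c) := by
  induction l with
  | nil => simp
  | cons x xs ih =>
    simp only [List.mem_cons, not_or] at h
    simp only [List.cons_append, List.takeWhile_cons]
    rw [if_pos (by simp [pvNe]; rintro rfl; exact h.1 rfl), ih h.2]

theorem tw_append_left {c : Char} {l t : List Char} (h : c ∈ l) :
    (l ++ t).takeWhile (pvNe c) = l.takeWhile (pvNe c) := by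
  induction l with
  | nil => cases h
  | cons x xs ih =>
    by_cases hx : x = c
    · subst hx
      simp only [List.cons_append, List.takeWhile_cons]
      rw [if_neg (by simp [pvNe]), if_neg (by simp [pvNe])]
    · have hc : c ∈ xs := by
        rcases List.mem_cons.mp h with h' | h'
        · exact absurd h'.symm hx
        · exact h'
      simp only [List.cons_append, List.takeWhile_cons]
      rw [ih hc]

theorem isIdent_brace {s : List Char} (h : '{' ∈ s) : pyIsIdentifier s = false := by
  cases s with
  | nil => cases h
  | cons c rest =>
    rcases List.mem_cons.mp h with h' | h'
    · rw [← h']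
      simp [pyIsIdentifier]
    · have hall : rest.all (fun d => d.isAlphanum || d == '_') = false :=
        List.all_eq_false.mpr ⟨'{', h', by decide⟩
      simp [pyIsIdentifier, hall]

theorem splitLB_ne_nil (cs : List Char) : splitLB cs ≠ [] := by
  cases cs with
  | nil => simp [splitLB]
  | cons x xs =>
    rw [splitLB]
    split_ifs
    · simp
    · split <;> simp

theorem splitLB_spec : ∀ (cs : List Char) {lit : List Char} {segs : List (List Char)},
    splitLB cs = lit :: segs →
      cs = lit ++ joinRest segs ∧ '{' ∉ lit ∧ ∀ s ∈ segs, '{' ∉ s := by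
  intro cs
  induction cs with
  | nil =>
    intro lit segs hs
    rw [splitLB] at hs
    injection hs with h1 h2
    subst h1; subst h2
    simp [joinRest]
  | cons x xs ih =>
    intro lit segs hs
    rw [splitLB] at hs
    by_cases hx : x = '{'
    · rw [if_pos hx] at hs
      injection hs with h1 h2
      subst h1
      cases hsp : splitLB xs with
      | nil => exact absurd hsp (splitLB_ne_nil xs)
      | cons p ps =>
        rw [hsp] at h2
        subst h2
        obtain ⟨hxs, hp, hps⟩ := ih hsp
        refine ⟨by simp [joinRest_cons, hx, hxs], by simp, ?_⟩
        intro t htm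
        rcases List.mem_cons.mp htm with h' | h'
        · rw [h']; exact hp
        · exact hps t h'
    · rw [if_neg hx] at hs
      cases hsp : splitLB xs with
      | nil => exact absurd hsp (splitLB_ne_nil xs)
      | cons p ps =>
        rw [hsp] at hs
        injection hs with h1 h2
        subst h1; subst h2
        obtain ⟨hxs, hp, hps⟩ := ih hsp
        refine ⟨by simp [hxs], ?_, hps⟩
        intro hmem
        rcases List.mem_cons.mp hmem with h' | h'
        · exact hx h'.symm
        · exact hp h'

theorem loopAB (segs : List (List Char)) :
    ∀ (cs : List Char) (pos : Nat) (lit acc : List Char) (seen : Bool) (wc : Nat),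
    cs.drop pos = lit ++ joinRest segs →
    '{' ∉ lit → (∀ s ∈ segs, '{' ∉ s) →
    (pos = 0 ∨ cs.getD (pos - 1) ' ' = '}') →
    ((loopA cs pos acc seen wc).bind (fun rn => if 1 < rn.2 then none else some rn.1))
      = loopB segs lit acc wc seen := by
  induction segs with
  | nil =>
    intro cs pos lit acc seen wc hdrop hlit _ _
    simp only [joinRest_nil, List.append_nil] at hdrop
    have hf1 : pvFindA cs '{' pos = none := by
      rw [pvFindA, hdrop, firstIdx_none hlit]; rfl
    rw [loopA]
    split
    next pos1 hpos1 => rw [hf1] at hpos1; cases hpos1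
    next hpos1 =>
      by_cases hm : '}' ∈ lit
      · split
        next p hpos2 => simp [loopB, hm]
        next hpos2 =>
          have hf2 : pvFindA cs '}' pos = some (pos + (lit.takeWhile (pvNe '}')).length) := by
            rw [pvFindA, hdrop, firstIdx_mem hm]; rfl
          rw [hf2] at hpos2; cases hpos2
      · split
        next p hpos2 =>
          have hf2 : pvFindA cs '}' pos = none := by
            rw [pvFindA, hdrop, firstIdx_none hm]; rfl
          rw [hf2] at hpos2; cases hpos2
        next hpos2 =>
          simp only [hdrop, loopB]
          rw [if_neg hm]
          by_cases hs : seen = true ∧ lit ≠ []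
          · rw [if_pos hs, if_pos hs]
            rfl
          · rw [if_neg hs, if_neg hs]
            rfl
  | cons seg rest ih =>
    intro cs pos lit acc seen wc hdrop hlit hsegs hinv
    have hseg' : '{' ∉ seg := hsegs seg List.mem_cons_self
    have hrest : ∀ s ∈ rest, '{' ∉ s := fun s hs => hsegs s (List.mem_cons_of_mem _ hs)
    rw [joinRest_cons] at hdrop
    have hf1 : pvFindA cs '{' pos = some (pos + lit.length) := by
      rw [pvFindA, hdrop]
      rw [firstIdx_mem (by simp : '{' ∈ lit ++ '{' :: (seg ++ joinRest rest))]
      rw [tw_append_none hlit, List.takeWhile_cons, if_neg (by simp [pvNe])]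
      simp
    have hdrop1 : cs.drop (pos + lit.length + 1) = seg ++ joinRest rest := by
      have h2 : (lit ++ '{' :: (seg ++ joinRest rest)).drop (lit.length + 1)
          = seg ++ joinRest rest := by
        rw [List.drop_append, List.drop_eq_nil_of_le (by omega),
          show lit.length + 1 - lit.length = 1 from by omega]
        simp
      rw [show pos + lit.length + 1 = pos + (lit.length + 1) from by omega,
        ← List.drop_drop, hdrop, h2]
    -- the slash test: A's look-back at path[pos1-1] ↔ B's lit.endswith('/')
    have hslash : (0 < pos + lit.length ∧ cs.getD (pos + lit.length - 1) ' ' = '/')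
        ↔ lit.getLast? = some '/' := by
      rcases eq_or_ne lit [] with hl | hl
      · subst hl
        simp only [List.length_nil, Nat.add_zero, List.getLast?_nil]
        constructor
        · rintro ⟨hp, hc⟩
          rcases hinv with h0 | hcur
          · omega
          · rw [hcur] at hc; exact absurd hc (by decide)
        · intro hx; cases hx
      · obtain ⟨c, hc⟩ : ∃ c, lit.getLast? = some c := by
          cases hgl : lit.getLast? with
          | none => exact absurd (List.getLast?_eq_none_iff.mp hgl) hl
          | some c => exact ⟨c, rfl⟩
        have hlen1 : 0 < lit.length := by
          cases lit with
          | nil => exact absurd rfl hl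
          | cons _ _ => simp
        have hgd : cs.getD (pos + lit.length - 1) ' ' = c := by
          rw [List.getD_eq_getElem?_getD,
            show pos + lit.length - 1 = pos + (lit.length - 1) from by omega,
            ← List.getElem?_drop, hdrop, List.getElem?_append_left (by omega),
            ← List.getLast?_eq_getElem?, hc]
          rfl
        constructor
        · rintro ⟨_, h2⟩; rw [hgd] at h2; rw [hc, h2]
        · intro hx
          rw [hc] at hx
          injection hx with hx
          exact ⟨by omega, by rw [hgd, hx]⟩
    have hsliceF : (cs.drop pos).take (pos + lit.length - pos) = lit := by
      rw [hdrop, show pos + lit.length - pos = lit.length from by omega]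
      exact List.take_left
    by_cases hseg : '}' ∈ seg
    · -- well-formed group: '}' closes inside this segment
      have hklt : (seg.takeWhile (pvNe '}')).length < seg.length := tw_lt hseg
      have hf2 : pvFindA cs '}' (pos + lit.length + 1)
          = some (pos + lit.length + 1 + (seg.takeWhile (pvNe '}')).length) := by
        rw [pvFindA, hdrop1, firstIdx_mem (List.mem_append_left _ hseg), tw_append_left hseg]
        rfl
      have harg : (cs.drop (pos + lit.length + 1)).take
          (pos + lit.length + 1 + (seg.takeWhile (pvNe '}')).length - (pos + lit.length + 1))
          = seg.takeWhile (pvNe '}') := by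
        rw [hdrop1,
          show pos + lit.length + 1 + (seg.takeWhile (pvNe '}')).length - (pos + lit.length + 1)
            = (seg.takeWhile (pvNe '}')).length from by omega,
          List.take_append,
          show (seg.takeWhile (pvNe '}')).length - seg.length = 0 from by omega]
        rw [List.take_zero, List.append_nil]
        exact take_tw _ _
      have htl_eq : (seg.dropWhile (pvNe '}')).tail
          = seg.drop ((seg.takeWhile (pvNe '}')).length + 1) := by
        rw [← drop_tw (pvNe '}') seg, List.tail_drop]
      have hdrop2 : cs.drop (pos + lit.length + 1 + (seg.takeWhile (pvNe '}')).length + 1)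
          = (seg.dropWhile (pvNe '}')).tail ++ joinRest rest := by
        rw [show pos + lit.length + 1 + (seg.takeWhile (pvNe '}')).length + 1
            = (pos + lit.length + 1) + ((seg.takeWhile (pvNe '}')).length + 1) from by omega,
          ← List.drop_drop, hdrop1, List.drop_append,
          show (seg.takeWhile (pvNe '}')).length + 1 - seg.length = 0 from by omega]
        rw [List.drop_zero, htl_eq]
      have hbrtl : '{' ∉ (seg.dropWhile (pvNe '}')).tail := by
        rw [htl_eq]; intro hx; exact hseg' (List.mem_of_mem_drop hx)
      have hinv2 : cs.getD (pos + lit.length + 1 + (seg.takeWhile (pvNe '}')).length) ' '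
          = '}' := by
        rw [List.getD_eq_getElem?_getD,
          show pos + lit.length + 1 + (seg.takeWhile (pvNe '}')).length
            = (pos + lit.length + 1) + (seg.takeWhile (pvNe '}')).length from by omega,
          ← List.getElem?_drop, hdrop1, List.getElem?_append_left hklt,
          ← List.head?_drop, drop_tw, dw_cons hseg]
        rfl
      have hsliceT : (cs.drop pos).take (pos + lit.length - 1 - pos) = lit.dropLast := by
        rw [hdrop, show pos + lit.length - 1 - pos = lit.length - 1 from by omega,
          List.take_append, show lit.length - 1 - lit.length = 0 from by omega]
        rw [List.take_zero, List.append_nil]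
        exact List.dropLast_eq_take.symm
      have hsl : (cs.drop pos).take
          ((if 0 < pos + lit.length ∧ cs.getD (pos + lit.length - 1) ' ' = '/'
            then pos + lit.length - 1 else pos + lit.length) - pos)
          = (if lit.getLast? = some '/' then lit.dropLast else lit) := by
        by_cases hc : lit.getLast? = some '/'
        · rw [if_pos (hslash.mpr hc), if_pos hc, hsliceT]
        · rw [if_neg (fun hx => hc (hslash.mp hx)), if_neg hc, hsliceF]
      rw [loopA]
      split
      next pos1 hpos1 =>
        rw [hf1] at hpos1
        injection hpos1 with hpos1e
        subst hpos1e
        split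
        next hpos2 => rw [hf2] at hpos2; cases hpos2
        next pos2 hpos2 =>
          rw [hf2] at hpos2
          injection hpos2 with hpos2e
          subst hpos2e
          simp only [loopB]
          rw [if_pos hseg]
          simp only [harg, hsl]
          by_cases hw : (seg.takeWhile (pvNe '}')).head? = some '*'
          · rw [if_pos hw]
            by_cases hid : pyIsIdentifier (seg.takeWhile (pvNe '}')).tail = true
            · rw [if_pos hid]
              have hrec := ih cs
                (pos + lit.length + 1 + (seg.takeWhile (pvNe '}')).length + 1)
                ((seg.dropWhile (pvNe '}')).tail)
                (acc ++ (if lit.getLast? = some '/' then lit.dropLast else lit)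
                  ++ restPatA (seg.takeWhile (pvNe '}')).tail)
                true (wc + 1) hdrop2 hbrtl hrest
                (Or.inr (by simpa using hinv2))
              rw [hrec, if_pos hw, if_pos hid]
              rfl
            · rw [if_neg hid, if_pos hw, if_neg hid]
              rfl
          · rw [if_neg hw]
            by_cases hid : pyIsIdentifier (seg.takeWhile (pvNe '}')) = true
            · rw [if_pos hid, hsliceF]
              have hrec := ih cs
                (pos + lit.length + 1 + (seg.takeWhile (pvNe '}')).length + 1)
                ((seg.dropWhile (pvNe '}')).tail)
                (acc ++ lit ++ varPatA (seg.takeWhile (pvNe '}')))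
                false wc hdrop2 hbrtl hrest
                (Or.inr (by simpa using hinv2))
              rw [hrec, if_neg hw, if_pos hid]
              rfl
            · rw [if_neg hid, if_neg hw, if_neg hid]
              rfl
      next hpos1 => rw [hf1] at hpos1; cases hpos1
    · -- '}' does not close inside this segment: A raises (one way or another), B raises
      have hB : loopB (seg :: rest) lit acc wc seen = none := by simp [loopB, hseg]
      rw [hB, loopA]
      split
      next pos1 hpos1 =>
        rw [hf1] at hpos1
        injection hpos1 with hpos1e
        subst hpos1e
        by_cases hjm : '}' ∈ joinRest rest
        · have hmem : '}' ∈ seg ++ joinRest rest := List.mem_append_right _ hjm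
          have hf2 : pvFindA cs '}' (pos + lit.length + 1)
              = some (pos + lit.length + 1
                  + ((seg ++ joinRest rest).takeWhile (pvNe '}')).length) := by
            rw [pvFindA, hdrop1, firstIdx_mem hmem]
            rfl
          split
          next hpos2 => rw [hf2] at hpos2; cases hpos2
          next pos2 hpos2 =>
            rw [hf2] at hpos2
            injection hpos2 with hpos2e
            subst hpos2e
            have harg2 : (cs.drop (pos + lit.length + 1)).take
                (pos + lit.length + 1 + ((seg ++ joinRest rest).takeWhile (pvNe '}')).length
                  - (pos + lit.length + 1))
                = (seg ++ joinRest rest).takeWhile (pvNe '}') := by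
              rw [hdrop1,
                show pos + lit.length + 1
                    + ((seg ++ joinRest rest).takeWhile (pvNe '}')).length
                    - (pos + lit.length + 1)
                  = ((seg ++ joinRest rest).takeWhile (pvNe '}')).length from by omega]
              exact take_tw _ _
            obtain ⟨s0, r0, hr0⟩ : ∃ s0 r0, rest = s0 :: r0 := by
              cases rest with
              | nil => simp [joinRest] at hjm
              | cons a b => exact ⟨a, b, rfl⟩
            have htw_eq : (seg ++ joinRest rest).takeWhile (pvNe '}')
                = seg ++ '{' :: ((s0 ++ joinRest r0).takeWhile (pvNe '}')) := by
              rw [tw_append_none hseg, hr0, joinRest_cons, List.takeWhile_cons,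
                if_pos (by simp [pvNe])]
            have hbr_arg : '{' ∈ (seg ++ joinRest rest).takeWhile (pvNe '}') := by
              rw [htw_eq]; simp
            simp only [harg2]
            by_cases hw : ((seg ++ joinRest rest).takeWhile (pvNe '}')).head? = some '*' 
            · have hsegne : seg ≠ [] := by
                intro h0
                rw [htw_eq, h0] at hw
                simp at hw
              obtain ⟨a, s', hsg⟩ := List.exists_cons_of_ne_nil hsegne
              have htail : '{' ∈ ((seg ++ joinRest rest).takeWhile (pvNe '}')).tail := by
                rw [htw_eq, hsg]
                simp
              rw [if_pos hw,
                if_neg (by simp [isIdent_brace htail] :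
                  ¬ pyIsIdentifier ((seg ++ joinRest rest).takeWhile (pvNe '}')).tail = true)]
              rfl
            · rw [if_neg hw,
                if_neg (by simp [isIdent_brace hbr_arg] :
                  ¬ pyIsIdentifier ((seg ++ joinRest rest).takeWhile (pvNe '}')) = true)]
              rfl
        · have hf2 : pvFindA cs '}' (pos + lit.length + 1) = none := by
            rw [pvFindA, hdrop1, firstIdx_none (by simp [hseg, hjm])]
            rfl
          split
          next hpos2 => rfl
          next pos2 hpos2 => rw [hf2] at hpos2; cases hpos2
      next hpos1 => rw [hf1] at hpos1; cases hpos1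

-- ===== VERDICT (by name: the statement is the Claim_ definition above) =====
theorem path_to_pattern_spec : Claim_equal_path_to_pattern := by
  intro path _ _
  unfold Spec_path_to_pattern path_to_pattern path_to_pattern_alt
  cases h : splitLB path.toList with
  | nil => exact absurd h (splitLB_ne_nil _)
  | cons lit segs =>
    obtain ⟨hjoin, hlit, hsegs⟩ := splitLB_spec path.toList h
    have hmain := loopAB segs path.toList 0 lit [] false 0 (by simpa using hjoin)
      hlit hsegs (Or.inl rfl)
    change _ = match loopB segs lit ([] : List Char) 0 false with
      | none => ""
      | some r => String.ofList r
    rw [← hmain]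
    cases hA : loopA path.toList 0 [] false 0 with
    | none => rfl
    | some rn =>
      obtain ⟨r, n⟩ := rn
      by_cases hn : 1 < n
      · simp [hn]
      · simp [hn]
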